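-- pv_equiv track=rewrite | github.com/AdamAndrei/algorithms-and-programming-course | lab 3/ALARM_CLOCK/Better_Menu.py | subsequence_thirteen
-- ===== SOURCE A (Python) =====
-- def is_prime(n):
--     if n >= 2:
--         for d in range(2, n // 2 + 1):
--             if n % d == 0:
--                 return False
--         return True
--     else:
--         return False
--
-- def prime_digits(n):
--     while n > 0:
--         ld = n % 10
--         if is_prime(ld):
--             return True
--         else:
--             break
--
-- def subsequence_thirteen(list):
--     beststart = 0
--     bestcount = 0
--     curentstart = 0
--     curentcount = 0
--     for index in range(len(list)):
--         if prime_digits(list[index]):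
--             curentcount += 1
--             if curentcount == 1:
--                 curentstart = index
--             if curentcount > bestcount:
--                 bestcount = curentcount
--                 beststart = curentstart
--         else:
--             curentcount = 0
--     return list[beststart: beststart + bestcount]
-- ===== SOURCE B (Python) =====
-- def _qualifies(x):
--     # last digit is a prime (2, 3, 5, 7); non-positive numbers never qualify
--     return x > 0 and x % 10 in (2, 3, 5, 7)
--
-- def subsequence_thirteen(list):
--     # Phase 1: collect every maximal run of qualifying elements as (start, length).
--     runs = []
--     i = 0
--     n = len(list)
--     while i < n:
--         if _qualifies(list[i]):
--             j = i + 1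
--             while j < n and _qualifies(list[j]):
--                 j += 1
--             runs.append((i, j - i))
--             i = j
--         else:
--             i += 1
--     if not runs:
--         return list[0:0]
--     # Phase 2: first run of maximum length (strict > keeps the earliest).
--     best = runs[0]
--     for r in runs[1:]:
--         if r[1] > best[1]:
--             best = r
--     return list[best[0]: best[0] + best[1]]
-- ===== Notes on version B (the rewrite author's own statement) =====
-- stated objective: alternative
-- what changed: Replaces A's single-pass four-variable state machine with a two-phase decomposition: first collect every maximal run of qualifying elements as (start, length) pairs, then pick the earliest longest run and slice; the trial-division primality test on the last digit is replaced by a direct membership test among the prime digits.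
import Mathlib
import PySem

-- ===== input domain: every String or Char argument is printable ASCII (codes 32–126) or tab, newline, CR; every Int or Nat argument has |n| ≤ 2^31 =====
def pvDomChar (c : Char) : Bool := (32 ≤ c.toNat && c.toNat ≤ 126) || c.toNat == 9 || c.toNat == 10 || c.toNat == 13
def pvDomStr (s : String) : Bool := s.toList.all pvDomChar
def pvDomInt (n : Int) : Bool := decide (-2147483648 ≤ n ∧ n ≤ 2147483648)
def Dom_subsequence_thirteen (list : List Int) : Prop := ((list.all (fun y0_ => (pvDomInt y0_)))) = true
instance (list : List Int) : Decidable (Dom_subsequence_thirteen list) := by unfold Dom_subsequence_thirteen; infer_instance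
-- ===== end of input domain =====

-- B replaces A's one-pass four-variable state machine by a two-phase decomposition
-- (collect maximal runs, then take the earliest longest and slice); same O(n) cost.

-- ===== PORT A =====
def is_prime (n : Int) : Bool :=
  if n ≥ 2 then
    -- the for-loop with early 'return False' is the existence check over range(2, n//2+1)
    if (PySem.List.pyRange 2 (PySem.Int.floordiv n 2 + 1) 1).any
        (fun d => PySem.Int.mod n d == 0) then false
    else true
  else false

-- Python's while-loop body always returns True or breaks (returning None, falsy),
-- so it runs at most once: truthy iff n > 0 and is_prime(n % 10).
def prime_digits (n : Int) : Bool :=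
  if n > 0 then is_prime (PySem.Int.mod n 10) else false

def subThirteenStep (list : List Int) (st : Int × Int × Int × Int) (index : Int) :
    Int × Int × Int × Int :=
  match st with
  | (bs, bc, cs, cc) =>
    if prime_digits (PySem.List.pyGetD list index 0) then
      let cc' := cc + 1
      let cs' := if cc' == 1 then index else cs
      if cc' > bc then (cs', cc', cs', cc') else (bs, bc, cs', cc')
    else (bs, bc, cs, 0)

def subsequence_thirteen (list : List Int) : List Int :=
  let st := (PySem.List.pyRange 0 (list.length : Int) 1).foldl (subThirteenStep list) (0, 0, 0, 0)
  PySem.List.slice list (some st.1) (some (st.1 + st.2.1))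

-- ===== PORT B =====
def qualifies (x : Int) : Bool :=
  decide (x > 0) && (PySem.Int.mod x 10 == 2 || PySem.Int.mod x 10 == 3 ||
                     PySem.Int.mod x 10 == 5 || PySem.Int.mod x 10 == 7)

-- Phase 1 of Source B: the outer while-loop collecting maximal runs; the inner j-scan
-- is the takeWhile/dropWhile split of the tail.
def runsB : List Int → Int → List (Int × Int)
  | [], _ => []
  | x :: xs, i =>
    if qualifies x then
      let t := (xs.takeWhile qualifies).length
      (i, 1 + (t : Int)) :: runsB (xs.dropWhile qualifies) (i + 1 + (t : Int))
    else
      runsB xs (i + 1)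
termination_by l _ => l.length
decreasing_by
  · have := List.length_dropWhile_le (p := qualifies) (l := xs); simp; omega
  · simp

def subsequence_thirteen_alt (list : List Int) : List Int :=
  match runsB list 0 with
  | [] => PySem.List.slice list (some 0) (some 0)
  | r :: rs =>
    -- Phase 2 of Source B: first run of maximum length (strict > keeps the earliest)
    let best := rs.foldl (fun b q => if q.2 > b.2 then q else b) r
    PySem.List.slice list (some best.1) (some (best.1 + best.2))

-- ===== PRECONDITION & SPEC =====
def Spec_subsequence_thirteen (list : List Int) (out : List Int) : Prop := out = subsequence_thirteen_alt list
instance (list : List Int) (out : List Int) : Decidable (Spec_subsequence_thirteen list out) := by unfold Spec_subsequence_thirteen; infer_instance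

-- ===== CLAIM (what is proved, stated in full; the proofs are below) =====
def Claim_equal_subsequence_thirteen : Prop := ∀ (list : List Int), Dom_subsequence_thirteen list → Spec_subsequence_thirteen list (subsequence_thirteen list)

-- ===== LEMMAS AND PROOFS =====

-- the two predicates agree on every integer
theorem pd_eq_qualifies (x : Int) : prime_digits x = qualifies x := by
  unfold prime_digits qualifies
  by_cases hx : 0 < x
  · have hmod : PySem.Int.mod x 10 = x % 10 := PySem.Int.mod_eq_emod_of_pos (by omega)
    have h0 : 0 ≤ x % 10 := Int.emod_nonneg x (by omega)
    have h9 : x % 10 < 10 := Int.emod_lt_of_pos x (by omega)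
    simp only [hmod, hx, decide_true, Bool.true_and]
    interval_cases h : (x % 10) <;> decide
  · simp [hx]

-- value-level recursion equivalent to A's indexed fold
def stepV (x : Int) (j : Int) (st : Int × Int × Int × Int) : Int × Int × Int × Int :=
  match st with
  | (bs, bc, cs, cc) =>
    if qualifies x then
      let cc' := cc + 1
      let cs' := if cc' == 1 then j else cs
      if cc' > bc then (cs', cc', cs', cc') else (bs, bc, cs', cc')
    else (bs, bc, cs, 0)

def loopRec : List Int → Int → (Int × Int × Int × Int) → (Int × Int × Int × Int)
  | [], _, st => st
  | x :: xs, j, st => loopRec xs (j + 1) (stepV x j st)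

theorem fold_eq_loopRec (L : List Int) :
    ∀ (n k : Nat) (st : Int × Int × Int × Int), L.length - k ≤ n →
    (PySem.List.pyRange (k : Int) (L.length : Int) 1).foldl (subThirteenStep L) st
      = loopRec (L.drop k) (k : Int) st := by
  intro n
  induction n with
  | zero =>
    intro k st hk
    have hge : L.length ≤ k := by omega
    rw [PySem.List.pyRange_one_eq_nil (by exact_mod_cast hge)]
    rw [List.drop_eq_nil_of_le hge]
    rfl
  | succ m ih =>
    intro k st hk
    by_cases hlt : k < L.length
    · rw [PySem.List.pyRange_one_cons (by exact_mod_cast hlt)]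
      have hdrop : L.drop k = L[k] :: L.drop (k + 1) := by
        rw [List.drop_eq_getElem_cons hlt]
      rw [hdrop]
      simp only [List.foldl_cons, loopRec]
      have hstep : subThirteenStep L st (k : Int) = stepV L[k] (k : Int) st := by
        unfold subThirteenStep stepV
        rw [pd_eq_qualifies]
        rw [PySem.List.pyGetD_natCast]
        rw [List.getD_eq_getElem L 0 hlt]
      rw [hstep]
      have hcast : ((k : Int) + 1) = ((k + 1 : Nat) : Int) := by push_cast; ring
      rw [hcast]
      exact ih (k + 1) _ (by omega)
    · have hge : L.length ≤ k := by omega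
      rw [PySem.List.pyRange_one_eq_nil (by exact_mod_cast hge)]
      rw [List.drop_eq_nil_of_le hge]
      rfl

-- consuming a fully-qualifying prefix while inside a run (cc = c ≥ 1, best already ≥ c)
theorem loopRec_run (pfx : List Int) :
    ∀ (rest : List Int) (j bs bc cs c : Int),
    (∀ x ∈ pfx, qualifies x = true) → 1 ≤ c → c ≤ bc →
    loopRec (pfx ++ rest) j (bs, bc, cs, c)
      = loopRec rest (j + pfx.length)
          (if c + (pfx.length : Int) > bc then ((cs, c + pfx.length, cs, c + pfx.length) : Int × Int × Int × Int)
           else (bs, bc, cs, c + pfx.length)) := by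
  induction pfx with
  | nil =>
    intro rest j bs bc cs c _ _ hcb
    simp only [List.length_nil, Nat.cast_zero, add_zero, List.nil_append]
    rw [if_neg (by omega)]
  | cons x pfx' ih =>
    intro rest j bs bc cs c hall hc hcb
    have hx : qualifies x = true := hall x (List.mem_cons_self)
    simp only [List.cons_append, loopRec, stepV, hx, if_pos]
    have hne : (c + 1 == 1) = false := by simp; omega
    simp only [hne, Bool.false_eq_true, if_false]
    have htail : ∀ y ∈ pfx', qualifies y = true := fun y hy => hall y (List.mem_cons_of_mem _ hy)
    have hL : (((x :: pfx').length : Nat) : Int) = (pfx'.length : Int) + 1 := by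
      simp only [List.length_cons]; push_cast; ring
    by_cases h1 : c + 1 > bc
    · rw [if_pos h1,
         ih rest (j + 1) cs (c + 1) cs (c + 1) htail (by omega) (le_refl _), hL]
      have hj : j + 1 + (pfx'.length : Int) = j + ((pfx'.length : Int) + 1) := by ring
      rw [hj]
      refine congrArg _ ?_
      split_ifs <;> simp only [Prod.mk.injEq, true_and] <;> omega
    · rw [if_neg h1,
         ih rest (j + 1) bs bc cs (c + 1) htail (by omega) (by omega), hL]
      have hj : j + 1 + (pfx'.length : Int) = j + ((pfx'.length : Int) + 1) := by ring
      rw [hj]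
      refine congrArg _ ?_
      split_ifs <;> simp only [Prod.mk.injEq, true_and] <;> omega

def finBest (st : Int × Int × Int × Int) : Int × Int := (st.1, st.2.1)

def stepB (b q : Int × Int) : Int × Int := if q.2 > b.2 then q else b

theorem loopRec_runs (N : Nat) :
    ∀ (l : List Int), l.length ≤ N → ∀ (j bs bc cs : Int),
    finBest (loopRec l j (bs, bc, cs, 0)) = (runsB l j).foldl stepB (bs, bc) := by
  induction N with
  | zero =>
    intro l hl j bs bc cs
    have : l = [] := List.eq_nil_of_length_eq_zero (by omega)
    subst this
    simp [runsB, loopRec, finBest]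
  | succ m ih =>
    intro l hl j bs bc cs
    match l with
    | [] => simp [runsB, loopRec, finBest]
    | x :: xs =>
      by_cases hx : qualifies x = true
      · -- start of a run at index j
        simp only [loopRec, stepV, hx, if_pos]
        simp only [zero_add]
        set t := (xs.takeWhile qualifies).length with ht
        have hsplit : xs = xs.takeWhile qualifies ++ xs.dropWhile qualifies :=
          (List.takeWhile_append_dropWhile).symm
        have hall : ∀ y ∈ xs.takeWhile qualifies, qualifies y = true := by
          intro y hy; exact List.mem_takeWhile_imp hy
        have hrun : ∀ (bs1 bc1 : Int), 1 ≤ bc1 →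
            loopRec xs (j + 1) (bs1, bc1, j, 1)
              = loopRec (xs.dropWhile qualifies) (j + 1 + (t : Int))
                  (if 1 + (t : Int) > bc1 then ((j, 1 + (t : Int), j, 1 + (t : Int)) : Int × Int × Int × Int)
                   else (bs1, bc1, j, 1 + (t : Int))) := by
          intro bs1 bc1 hb1
          conv_lhs => rw [hsplit]
          rw [loopRec_run _ _ _ _ _ _ _ hall (by omega) hb1]
        have hbest : (if (1 : Int) > bc then loopRec xs (j + 1) (j, 1, j, 1)
                       else loopRec xs (j + 1) (bs, bc, j, 1))
            = loopRec (xs.dropWhile qualifies) (j + 1 + (t : Int))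
                (if 1 + (t : Int) > bc then ((j, 1 + (t : Int), j, 1 + (t : Int)) : Int × Int × Int × Int)
                 else (bs, bc, j, 1 + (t : Int))) := by
          by_cases h1 : (1 : Int) > bc
          · rw [if_pos h1, hrun j 1 (le_refl _)]
            refine congrArg _ ?_
            split_ifs <;> simp only [Prod.mk.injEq, true_and, and_true] <;> omega
          · rw [if_neg h1]
            exact hrun bs bc (by omega)
        have hrunsB : runsB (x :: xs) j
            = (j, 1 + (t : Int)) :: runsB (xs.dropWhile qualifies) (j + 1 + (t : Int)) := by
          rw [runsB, if_pos hx]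
        have hfold : (runsB (x :: xs) j).foldl stepB (bs, bc)
            = (runsB (xs.dropWhile qualifies) (j + 1 + (t : Int))).foldl stepB
                (if 1 + (t : Int) > bc then (j, 1 + (t : Int)) else (bs, bc)) := by
          rw [hrunsB, List.foldl_cons]; rfl
        rw [hfold]
        have hgoal : finBest (if (1 : Int) > bc then loopRec xs (j + 1) (j, 1, j, 1)
                       else loopRec xs (j + 1) (bs, bc, j, 1))
            = (runsB (xs.dropWhile qualifies) (j + 1 + (t : Int))).foldl stepB
                (if 1 + (t : Int) > bc then (j, 1 + (t : Int)) else (bs, bc)) := by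
          rw [hbest]
          match hdw : xs.dropWhile qualifies with
          | [] =>
            simp only [runsB, List.foldl_nil, loopRec]
            split_ifs with h <;> rfl
          | y :: ys =>
            have hy : qualifies y = false := by
              have h := List.head_dropWhile_not qualifies (l := xs) (by rw [hdw]; simp)
              simpa [hdw] using h
            simp only [loopRec, stepV, hy, Bool.false_eq_true, if_false, runsB]
            have hys : ys.length ≤ m := by
              have h1 : (y :: ys).length ≤ xs.length := by
                rw [← hdw]; exact List.length_dropWhile_le _ _
              simp only [List.length_cons] at h1 hl ⊢
              omega
            split_ifs with h
            · exact ih ys hys (j + 1 + (t : Int) + 1) j (1 + (t : Int)) j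
            · exact ih ys hys (j + 1 + (t : Int) + 1) bs bc j
        calc finBest (loopRec xs (j + 1) (if 1 > bc then ((j, 1, j, 1) : Int × Int × Int × Int) else (bs, bc, j, 1)))
            = finBest (if (1 : Int) > bc then loopRec xs (j + 1) (j, 1, j, 1)
                       else loopRec xs (j + 1) (bs, bc, j, 1)) := by
              split_ifs with h <;> rfl
          _ = _ := hgoal
      · -- x does not qualify: current count resets (stays 0)
        simp only [loopRec, stepV, hx, Bool.false_eq_true, if_false]
        rw [runsB]
        simp only [hx, Bool.false_eq_true, if_false]
        exact ih xs (by simp at hl; omega) (j + 1) bs bc cs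

theorem runsB_pos : ∀ (l : List Int) (j : Int) (r : Int × Int), r ∈ runsB l j → 0 < r.2 := by
  intro l j
  induction l, j using runsB.induct with
  | case1 i => intro r hr; simp [runsB] at hr
  | case2 x xs i hx t ih =>
    intro r hr
    rw [runsB] at hr
    simp only [hx, if_pos] at hr
    rcases List.mem_cons.mp hr with h | h
    · subst h; simp; omega
    · exact ih r h
  | case3 x xs i hx ih =>
    intro r hr
    rw [runsB] at hr
    simp only [hx, Bool.false_eq_true, if_false] at hr
    exact ih r hr

-- ===== VERDICT (by name: the statement is the Claim_ definition above) =====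
theorem subsequence_thirteen_spec : Claim_equal_subsequence_thirteen := by
  intro list _
  unfold Spec_subsequence_thirteen subsequence_thirteen subsequence_thirteen_alt
  have h0 : (PySem.List.pyRange 0 (list.length : Int) 1).foldl (subThirteenStep list) (0, 0, 0, 0)
      = loopRec list 0 (0, 0, 0, 0) := by
    have := fold_eq_loopRec list list.length 0 (0, 0, 0, 0) (by omega)
    simpa using this
  rw [h0]
  have hmain := loopRec_runs list.length list (le_refl _) 0 0 0 0
  match hruns : runsB list 0 with
  | [] =>
    rw [hruns] at hmain
    simp only [List.foldl_nil] at hmain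
    unfold finBest at hmain
    have h1 : (loopRec list 0 (0, 0, 0, 0)).1 = (0 : Int) := by
      have := congrArg Prod.fst hmain; simpa using this
    have h2 : (loopRec list 0 (0, 0, 0, 0)).2.1 = (0 : Int) := by
      have := congrArg Prod.snd hmain; simpa using this
    show PySem.List.slice list (some (loopRec list 0 (0, 0, 0, 0)).1)
          (some ((loopRec list 0 (0, 0, 0, 0)).1 + (loopRec list 0 (0, 0, 0, 0)).2.1))
        = PySem.List.slice list (some 0) (some 0)
    rw [h1, h2]
    norm_num
  | r :: rs =>
    rw [hruns] at hmain
    have hr2 : 0 < r.2 := runsB_pos list 0 r (by rw [hruns]; exact List.mem_cons_self)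
    have hfirst : stepB (0, 0) r = r := by
      unfold stepB; rw [if_pos (by simpa using hr2)]
    rw [List.foldl_cons, hfirst] at hmain
    unfold finBest at hmain
    have h1 : (loopRec list 0 (0, 0, 0, 0)).1 = (rs.foldl stepB r).1 := by
      have := congrArg Prod.fst hmain; simpa using this
    have h2 : (loopRec list 0 (0, 0, 0, 0)).2.1 = (rs.foldl stepB r).2 := by
      have := congrArg Prod.snd hmain; simpa using this
    show PySem.List.slice list (some (loopRec list 0 (0, 0, 0, 0)).1)
          (some ((loopRec list 0 (0, 0, 0, 0)).1 + (loopRec list 0 (0, 0, 0, 0)).2.1))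
        = PySem.List.slice list (some (rs.foldl stepB r).1)
          (some ((rs.foldl stepB r).1 + (rs.foldl stepB r).2))
    rw [h1, h2]
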